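-- pv_equiv track=rewrite | github.com/Zjiay01/BadDiffusion | scripts/write_merge_result_index.py | infer_scenario
-- ===== SOURCE A (Python) =====
-- def infer_scenario(name: str):
--     if name.startswith("merge_medium_nodef"):
--         return "nodef"
--     if name.startswith("fid1000_nodef"):
--         return "nodef_fid1000"
--     if name.startswith("celeba_hq_nodef"):
--         return "celeba_hq_nodef"
--     if name.startswith("celeba_hq_s1"):
--         return "celeba_hq_s1"
--     if name.startswith("badmerge_"):
--         return "badmerge_" + infer_scenario(name[len("badmerge_"):])
--     if "_s1_hat_" in name:
--         return "s1_hat"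
--     if "_s1_cat_" in name:
--         return "s1_cat"
--     if "_s2_hat_" in name:
--         return "s2_hat"
--     if "_s2_cat_" in name:
--         return "s2_cat"
--     return "unknown"
-- ===== SOURCE B (Python) =====
-- def infer_scenario(name: str):
--     count = 0
--     while name.startswith("badmerge_"):
--         name = name[len("badmerge_"):]
--         count += 1
--     if name.startswith("merge_medium_nodef"):
--         label = "nodef"
--     elif name.startswith("fid1000_nodef"):
--         label = "nodef_fid1000"
--     elif name.startswith("celeba_hq_nodef"):
--         label = "celeba_hq_nodef"
--     elif name.startswith("celeba_hq_s1"):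
--         label = "celeba_hq_s1"
--     elif "_s1_hat_" in name:
--         label = "s1_hat"
--     elif "_s1_cat_" in name:
--         label = "s1_cat"
--     elif "_s2_hat_" in name:
--         label = "s2_hat"
--     elif "_s2_cat_" in name:
--         label = "s2_cat"
--     else:
--         label = "unknown"
--     return "badmerge_" * count + label
-- ===== Notes on version B (the rewrite author's own statement) =====
-- stated objective: simpler
-- what changed: Replaced A's recursive badmerge_ handling with an iterative loop that strips leading badmerge_ prefixes while counting them, then classifies the remainder once with the same ordered checks and prepends 'badmerge_'*count.
import Mathlib
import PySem

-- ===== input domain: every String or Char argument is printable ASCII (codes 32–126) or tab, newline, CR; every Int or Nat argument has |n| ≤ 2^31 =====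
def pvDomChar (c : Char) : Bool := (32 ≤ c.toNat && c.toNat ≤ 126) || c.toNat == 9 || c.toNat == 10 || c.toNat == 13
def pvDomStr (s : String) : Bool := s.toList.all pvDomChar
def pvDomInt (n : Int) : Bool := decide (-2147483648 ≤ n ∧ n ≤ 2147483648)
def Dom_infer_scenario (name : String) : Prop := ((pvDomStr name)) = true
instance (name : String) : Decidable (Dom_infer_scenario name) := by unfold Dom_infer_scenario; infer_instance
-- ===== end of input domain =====

-- B strips leading "badmerge_" prefixes iteratively (counting them) instead of recursing; same ordered checks, same values.

-- ===== PORT A =====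
-- A works on the code-point list; recursion on name[len("badmerge_"):] (a PySem slice), exactly as in the Python.
def inferScenarioChars (s : List Char) : List Char :=
  if PySem.Chars.startswith s "merge_medium_nodef".toList then "nodef".toList
  else if PySem.Chars.startswith s "fid1000_nodef".toList then "nodef_fid1000".toList
  else if PySem.Chars.startswith s "celeba_hq_nodef".toList then "celeba_hq_nodef".toList
  else if PySem.Chars.startswith s "celeba_hq_s1".toList then "celeba_hq_s1".toList
  else if h : PySem.Chars.startswith s "badmerge_".toList then
    "badmerge_".toList ++ inferScenarioChars (PySem.List.slice s (some (9:Int)) none)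
  else if PySem.Chars.isIn "_s1_hat_".toList s then "s1_hat".toList
  else if PySem.Chars.isIn "_s1_cat_".toList s then "s1_cat".toList
  else if PySem.Chars.isIn "_s2_hat_".toList s then "s2_hat".toList
  else if PySem.Chars.isIn "_s2_cat_".toList s then "s2_cat".toList
  else "unknown".toList
termination_by s.length
decreasing_by
  rw [PySem.List.slice_from s (by norm_num)]
  have hp := (PySem.Chars.startswith_iff s "badmerge_".toList).mp h
  have := hp.length_le
  simp at this ⊢
  omega

def infer_scenario (name : String) : String := String.ofList (inferScenarioChars name.toList)

-- ===== PORT B =====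
-- the while-loop of Source B: strip a leading "badmerge_" and count, until none is left
def stripBadmerge (s : List Char) : Nat × List Char :=
  if h : PySem.Chars.startswith s "badmerge_".toList then
    let p := stripBadmerge (PySem.List.slice s (some (9:Int)) none)
    (p.1 + 1, p.2)
  else (0, s)
termination_by s.length
decreasing_by
  rw [PySem.List.slice_from s (by norm_num)]
  have hp := (PySem.Chars.startswith_iff s "badmerge_".toList).mp h
  have := hp.length_le
  simp at this ⊢
  omega

-- the single classification pass of Source B (same ordered checks, no badmerge branch)
def classifyChars (s : List Char) : List Char :=
  if PySem.Chars.startswith s "merge_medium_nodef".toList then "nodef".toList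
  else if PySem.Chars.startswith s "fid1000_nodef".toList then "nodef_fid1000".toList
  else if PySem.Chars.startswith s "celeba_hq_nodef".toList then "celeba_hq_nodef".toList
  else if PySem.Chars.startswith s "celeba_hq_s1".toList then "celeba_hq_s1".toList
  else if PySem.Chars.isIn "_s1_hat_".toList s then "s1_hat".toList
  else if PySem.Chars.isIn "_s1_cat_".toList s then "s1_cat".toList
  else if PySem.Chars.isIn "_s2_hat_".toList s then "s2_hat".toList
  else if PySem.Chars.isIn "_s2_cat_".toList s then "s2_cat".toList
  else "unknown".toList

-- "badmerge_" * count + label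
def infer_scenario_alt (name : String) : String :=
  let p := stripBadmerge name.toList
  String.ofList ((List.replicate p.1 "badmerge_".toList).flatten ++ classifyChars p.2)

-- ===== PRECONDITION & SPEC =====
def Spec_infer_scenario (name : String) (out : String) : Prop := out = infer_scenario_alt name
instance (name : String) (out : String) : Decidable (Spec_infer_scenario name out) := by unfold Spec_infer_scenario; infer_instance

-- ===== CLAIM (what is proved, stated in full; the proofs are below) =====
def Claim_equal_infer_scenario : Prop := ∀ (name : String), Dom_infer_scenario name → Spec_infer_scenario name (infer_scenario name)

-- ===== LEMMAS AND PROOFS =====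
-- two prefixes of the same list with different first characters cannot coexist
theorem startswith_false_of_head_ne (s p q : List Char) (c d : Char)
    (hp : PySem.Chars.startswith s (c :: p) = true) (hne : c ≠ d) :
    PySem.Chars.startswith s (d :: q) = false := by
  by_contra h
  simp only [Bool.not_eq_false] at h
  obtain ⟨t1, h1⟩ := (PySem.Chars.startswith_iff s (c :: p)).mp hp
  obtain ⟨t2, h2⟩ := (PySem.Chars.startswith_iff s (d :: q)).mp h
  rw [← h1] at h2
  simp at h2
  exact hne h2.1.symm

theorem inferScenarioChars_eq (s : List Char) :
    inferScenarioChars s =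
      (List.replicate (stripBadmerge s).1 "badmerge_".toList).flatten ++ classifyChars (stripBadmerge s).2 := by
  by_cases h : PySem.Chars.startswith s "badmerge_".toList = true
  · have h1 := startswith_false_of_head_ne s "admerge_".toList "erge_medium_nodef".toList 'b' 'm'
      (by simpa using h) (by decide)
    have h2 := startswith_false_of_head_ne s "admerge_".toList "id1000_nodef".toList 'b' 'f'
      (by simpa using h) (by decide)
    have h3 := startswith_false_of_head_ne s "admerge_".toList "eleba_hq_nodef".toList 'b' 'c'
      (by simpa using h) (by decide)
    have h4 := startswith_false_of_head_ne s "admerge_".toList "eleba_hq_s1".toList 'b' 'c'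
      (by simpa using h) (by decide)
    rw [inferScenarioChars, stripBadmerge]
    simp only [show ("merge_medium_nodef".toList) = 'm' :: "erge_medium_nodef".toList from rfl,
      show ("fid1000_nodef".toList) = 'f' :: "id1000_nodef".toList from rfl,
      show ("celeba_hq_nodef".toList) = 'c' :: "eleba_hq_nodef".toList from rfl,
      show ("celeba_hq_s1".toList) = 'c' :: "eleba_hq_s1".toList from rfl,
      show ("badmerge_".toList) = 'b' :: "admerge_".toList from rfl] at *
    simp only [h1, h2, h3, h4, h, if_false, dif_pos, Bool.false_eq_true]
    have ih := inferScenarioChars_eq (PySem.List.slice s (some (9:Int)) none)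
    rw [ih]
    simp [List.replicate_succ]
  · rw [inferScenarioChars, stripBadmerge]
    simp only [h, dif_neg, Bool.false_eq_true, not_false_eq_true]
    simp [classifyChars]
termination_by s.length
decreasing_by
  rw [PySem.List.slice_from s (by norm_num)]
  have hp := (PySem.Chars.startswith_iff s "badmerge_".toList).mp h
  have := hp.length_le
  simp at this ⊢
  omega

-- ===== VERDICT (by name: the statement is the Claim_ definition above) =====
theorem infer_scenario_spec : Claim_equal_infer_scenario := by
  intro name _
  unfold Spec_infer_scenario infer_scenario infer_scenario_alt
  rw [inferScenarioChars_eq]
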